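-- pv_equiv track=rewrite | github.com/manisha-ghb/Python-Task1-2- | ProbelmSolving.py/funcTask.py | reverse_and_sum
-- ===== SOURCE A (Python) =====
-- def reverse_and_sum(num):
--     sum = 0
--     rem = 0
--     rev = 0
--     while num>0:
--         rem = num % 10
--         sum += rem
--         rev = (rev*10) + rem
--         num = num//10
--     return "Reverse number is",rev,"Sum of digits is",sum
-- ===== SOURCE B (Python) =====
-- def reverse_and_sum(num):
--     s = str(num) if num > 0 else ""
--     rev = 0
--     for c in reversed(s):
--         rev = rev * 10 + (ord(c) - 48)
--     total = sum(ord(c) - 48 for c in s)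
--     return "Reverse number is", rev, "Sum of digits is", total
-- ===== Notes on version B (the rewrite author's own statement) =====
-- stated objective: alternative
-- what changed: B reads the digits off the decimal string representation (str/ord) instead of peeling them arithmetically with % and // in a while loop.
import Mathlib
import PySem

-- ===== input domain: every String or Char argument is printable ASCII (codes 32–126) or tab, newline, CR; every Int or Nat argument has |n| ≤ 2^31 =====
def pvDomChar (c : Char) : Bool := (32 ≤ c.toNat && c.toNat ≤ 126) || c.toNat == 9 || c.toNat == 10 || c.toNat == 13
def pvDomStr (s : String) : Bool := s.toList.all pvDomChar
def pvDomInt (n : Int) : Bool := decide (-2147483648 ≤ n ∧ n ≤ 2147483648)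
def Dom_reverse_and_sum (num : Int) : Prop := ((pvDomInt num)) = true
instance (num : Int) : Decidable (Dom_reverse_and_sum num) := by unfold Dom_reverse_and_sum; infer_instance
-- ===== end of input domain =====

-- B reads the digits off the decimal string representation (str/ord) instead of peeling
-- them arithmetically with % and // in a while loop; same cost, different algorithm.

-- ===== PORT A =====
-- termination helper for A's while loop (cited by decreasing_by)
theorem rs_floordiv_toNat_lt (num : Int) (h : 0 < num) :
    (PySem.Int.floordiv num 10).toNat < num.toNat := by
  have : PySem.Int.floordiv num 10 = num / 10 := by
    simp [PySem.Int.floordiv, Int.fdiv_eq_ediv]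
  rw [this]; omega

-- the while loop: state (num, sum, rem, rev); returns (sum, rev)
def rs_loop (num sum rem rev : Int) : Int × Int :=
  if h : 0 < num then
    let rem' := PySem.Int.mod num 10
    rs_loop (PySem.Int.floordiv num 10) (sum + rem') rem' (rev * 10 + rem')
  else (sum, rev)
termination_by num.toNat
decreasing_by exact rs_floordiv_toNat_lt num h

def reverse_and_sum (num : Int) : String × Int × String × Int :=
  let p := rs_loop num 0 0 0
  ("Reverse number is", p.2, "Sum of digits is", p.1)

-- ===== PORT B =====
-- ord(c) - 48
def rs_digit (c : Char) : Int := (c.toNat : Int) - 48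

def reverse_and_sum_alt (num : Int) : String × Int × String × Int :=
  let s : List Char := if 0 < num then PySem.Int.toChars num else []
  let rev := s.reverse.foldl (fun a c => a * 10 + rs_digit c) 0
  let total := (s.map rs_digit).sum
  ("Reverse number is", rev, "Sum of digits is", total)

-- ===== PRECONDITION & SPEC =====
def Spec_reverse_and_sum (num : Int) (out : String × Int × String × Int) : Prop := out = reverse_and_sum_alt num
instance (num : Int) (out : String × Int × String × Int) : Decidable (Spec_reverse_and_sum num out) := by unfold Spec_reverse_and_sum; infer_instance

-- ===== CLAIM (what is proved, stated in full; the proofs are below) =====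
def Claim_equal_reverse_and_sum : Prop := ∀ (num : Int), Dom_reverse_and_sum num → Spec_reverse_and_sum num (reverse_and_sum num)

-- ===== LEMMAS AND PROOFS =====

-- decimal digit characters of a positive natural, most significant first
def rsNatChars (n : Nat) : List Char :=
  if h : n < 10 then [Nat.digitChar n]
  else rsNatChars (n / 10) ++ [Nat.digitChar (n % 10)]
termination_by n
decreasing_by exact Nat.div_lt_self (by omega) (by omega)

theorem rs_toDigitsCore_eq (f : Nat) : ∀ (n : Nat) (ds : List Char), n < f →
    Nat.toDigitsCore 10 f n ds = rsNatChars n ++ ds := by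
  induction f with
  | zero => intro n ds h; omega
  | succ f ih =>
    intro n ds h
    rw [Nat.toDigitsCore]
    by_cases h10 : n / 10 = 0
    · rw [if_pos h10, rsNatChars]
      have hn : n < 10 := by omega
      rw [dif_pos hn, Nat.mod_eq_of_lt hn]
      simp
    · have hlt : n / 10 < n := Nat.div_lt_self (by omega) (by norm_num)
      have hr : rsNatChars n = rsNatChars (n / 10) ++ [Nat.digitChar (n % 10)] := by
        rw [rsNatChars, dif_neg (by omega)]
      rw [if_neg h10, ih (n / 10) _ (by omega), hr]
      simp

theorem rs_toChars_pos (num : Int) (h : 0 < num) :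
    PySem.Int.toChars num = rsNatChars num.toNat := by
  rw [PySem.Int.toChars, if_neg (by omega), Nat.toDigits,
    rs_toDigitsCore_eq _ _ _ (Nat.lt_succ_self _), List.append_nil]

theorem rs_digit_digitChar (d : Nat) (h : d < 10) : rs_digit (Nat.digitChar d) = (d : Int) := by
  interval_cases d <;> decide

theorem rs_loop_eq (n : Nat) : 0 < n → ∀ (s rem r : Int),
    rs_loop (n : Int) s rem r =
      (s + ((rsNatChars n).map rs_digit).sum,
       (rsNatChars n).reverse.foldl (fun a c => a * 10 + rs_digit c) r) := by
  induction n using Nat.strong_induction_on with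
  | _ n ih =>
    intro hn s rem r
    have hmod : PySem.Int.mod (n : Int) 10 = ((n % 10 : Nat) : Int) := by
      simp [PySem.Int.mod, Int.fmod_eq_emod]
    have hdiv : PySem.Int.floordiv (n : Int) 10 = ((n / 10 : Nat) : Int) := by
      simp [PySem.Int.floordiv, Int.fdiv_eq_ediv]
    rw [rs_loop, dif_pos (by exact_mod_cast hn), hmod, hdiv]
    by_cases h10 : n < 10
    · have : n / 10 = 0 := by omega
      rw [this, rsNatChars, dif_pos h10]
      rw [rs_loop, dif_neg (by norm_num)]
      simp [rs_digit_digitChar n h10, Nat.mod_eq_of_lt h10]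
    · have hlt : n / 10 < n := Nat.div_lt_self (by omega) (by norm_num)
      have hr : rsNatChars n = rsNatChars (n / 10) ++ [Nat.digitChar (n % 10)] := by
        rw [rsNatChars, dif_neg h10]
      rw [ih (n / 10) hlt (by omega) (s + ((n % 10 : Nat) : Int)) _ _, hr]
      simp only [List.map_append, List.sum_append, List.map_cons, List.map_nil, List.sum_cons,
        List.sum_nil, List.reverse_append, List.reverse_cons, List.reverse_nil, List.nil_append,
        List.cons_append, List.foldl_cons, Prod.mk.injEq]
      rw [rs_digit_digitChar (n % 10) (by omega)]
      exact ⟨by ring, rfl⟩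

-- ===== VERDICT (by name: the statement is the Claim_ definition above) =====
theorem reverse_and_sum_spec : Claim_equal_reverse_and_sum := by
  intro num _
  unfold Spec_reverse_and_sum reverse_and_sum reverse_and_sum_alt
  by_cases h : 0 < num
  · have hn : (num.toNat : Int) = num := Int.toNat_of_nonneg h.le
    have hpos : 0 < num.toNat := by omega
    rw [if_pos h, rs_toChars_pos num h]
    have hl := rs_loop_eq num.toNat hpos 0 0 0
    rw [hn] at hl
    rw [hl]
    simp only [zero_add]
  · rw [if_neg h, rs_loop, dif_neg h]
    simp
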